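-- pv_equiv track=rewrite | github.com/ArchipelagoMW/Archipelago | worlds/rabi_ribi/converter/diffgenerator.py | format_diff
-- ===== SOURCE A (Python) =====
-- def compute_bounding_box(coordinate_list):
--     x1 = min(x for x,y in coordinate_list)
--     y1 = min(y for x,y in coordinate_list)
--     x2 = max(x for x,y in coordinate_list) + 1
--     y2 = max(y for x,y in coordinate_list) + 1
--     return x1, y1, (x2-x1), (y2-y1)
--
-- def box_format(x1, y1, w, h, layer_name, diff):
--     sb = ['@%s:B(%d,%d)' % (layer_name, x1, y1)]
--     sorted_diff = [(c[0],c[1],v) for i,c,v in diff]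
--     sorted_diff.sort(key=lambda p : (p[1],p[0]))
--     box = [['']*w for i in range(h)]
--     for i, c, value in diff:
--         x, y = c
--         box[y-y1][x-x1] = str(value)
--     box = [row[:max(i for i,v in enumerate([1]+row) if v != '')] for row in box]
--     sb += [','.join(row) for row in box]
--     return sb
--
-- def line_format(layer_name, diff):
--     sb = ['@%s:L' % layer_name]
--     sb += ['%d,%d:%d' % (c[0], c[1], v) for i,c,v in diff]
--     return sb
--
-- def format_diff(layer_name, diff):
--     coordinate_list = [(coords[0], coords[1]) for index,coords,value in diff]
--     x1,y1,w,h = compute_bounding_box(coordinate_list)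
--
--     size_box_format = (w-1)*h
--     size_line_format = len(coordinate_list)*8
--
--     if size_box_format < size_line_format:
--         return box_format(x1, y1, w, h, layer_name, diff)
--     else:
--         return line_format(layer_name, diff)
-- ===== SOURCE B (Python) =====
-- def format_diff(layer_name, diff):
--     x1 = x2 = diff[0][1][0]
--     y1 = y2 = diff[0][1][1]
--     for _, (x, y), _ in diff:
--         if x < x1: x1 = x
--         if x > x2: x2 = x
--         if y < y1: y1 = y
--         if y > y2: y2 = y
--     w = x2 - x1 + 1
--     h = y2 - y1 + 1
--     if (w - 1) * h < len(diff) * 8: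
--         rows = {}
--         for _, (x, y), v in diff:
--             rows.setdefault(y - y1, {})[x - x1] = str(v)
--         sb = ['@%s:B(%d,%d)' % (layer_name, x1, y1)]
--         for r in range(h):
--             cells = rows.get(r, {})
--             if cells:
--                 m = max(cells)
--                 sb.append(','.join(cells.get(c, '') for c in range(m + 1)))
--             else:
--                 sb.append('')
--         return sb
--     else:
--         return ['@%s:L' % layer_name] + ['%d,%d:%d' % (x, y, v) for _, (x, y), v in diff]
-- ===== Notes on version B (the rewrite author's own statement) =====
-- stated objective: alternative
-- what changed: Single fold computes the bounding box instead of four min/max generator passes, and the box branch groups entries into a per-row dict of occupied columns and reconstructs each line up to its largest occupied column, instead of scattering into a dense w*h grid, trimming trailing empties, and performing A's dead sort.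
-- outside the precondition, e.g. on format_diff('layer', []): A raises ValueError, B raises IndexError
import Mathlib
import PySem

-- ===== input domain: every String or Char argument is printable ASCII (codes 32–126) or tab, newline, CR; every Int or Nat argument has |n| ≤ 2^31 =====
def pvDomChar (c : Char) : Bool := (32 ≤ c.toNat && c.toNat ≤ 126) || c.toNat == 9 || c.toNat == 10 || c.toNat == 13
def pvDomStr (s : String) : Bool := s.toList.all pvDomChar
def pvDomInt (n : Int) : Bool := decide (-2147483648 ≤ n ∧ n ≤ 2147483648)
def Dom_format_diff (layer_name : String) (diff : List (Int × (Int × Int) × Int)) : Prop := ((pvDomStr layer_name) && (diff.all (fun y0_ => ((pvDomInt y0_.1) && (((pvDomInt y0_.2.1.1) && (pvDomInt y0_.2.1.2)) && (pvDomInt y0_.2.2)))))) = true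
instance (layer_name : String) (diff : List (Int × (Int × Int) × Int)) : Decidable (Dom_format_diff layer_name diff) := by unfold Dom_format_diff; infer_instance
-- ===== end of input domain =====

-- B replaces A's min/max generator passes with one fold and A's dense w×h scatter grid (plus its
-- dead sort and trailing-cell trimming) with a per-row dict of occupied columns; return values only.

-- ===== PORT A =====
-- Python's min()/max() raise ValueError on an empty list: Pre_format_diff excludes diff = [],
-- so the .getD 0 defaults below are never reached on admitted inputs.
def compute_bounding_box (coordinate_list : List (Int × Int)) : Int × Int × Int × Int :=
  let x1 := (PySem.List.min? (coordinate_list.map (fun p => p.1)) id).getD 0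
  let y1 := (PySem.List.min? (coordinate_list.map (fun p => p.2)) id).getD 0
  let x2 := (PySem.List.max? (coordinate_list.map (fun p => p.1)) id).getD 0 + 1
  let y2 := (PySem.List.max? (coordinate_list.map (fun p => p.2)) id).getD 0 + 1
  (x1, y1, x2 - x1, y2 - y1)

-- box[r][c] = s ; Python-exact for in-range indices including negative wraparound
-- (inside format_diff the indices always lie inside the bounding box, so no IndexError can occur)
def pySet2 (box : List (List String)) (r c : Int) (s : String) : List (List String) :=
  box.modify (if r < 0 then r + box.length else r).toNat
    (fun row => row.set (if c < 0 then c + row.length else c).toNat s)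

def box_format (x1 y1 w h : Int) (layer_name : String) (diff : List (Int × (Int × Int) × Int)) : List String :=
  let sb := ["@" ++ layer_name ++ ":B(" ++ PySem.Int.toStr x1 ++ "," ++ PySem.Int.toStr y1 ++ ")"]
  -- sorted_diff is computed and then never used, exactly as in the Python
  -- the tuple sort key (p[1], p[0]) is compared lexicographically; a two-element Int list has the same order
  let sorted_diff := PySem.List.sorted (diff.map (fun p => (p.2.1.1, p.2.1.2, p.2.2))) (fun p => [p.2.1, p.1])
  let _ := sorted_diff
  let box := List.replicate h.toNat (List.replicate w.toNat "")
  let box := diff.foldl (fun box p => pySet2 box (p.2.1.2 - y1) (p.2.1.1 - x1) (PySem.Int.toStr p.2.2)) box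
  -- row[:max(i for i,v in enumerate([1]+row) if v != '')] : the [1] head always contributes
  -- index 0 (folded in as the initial value of max); entry row[i] contributes index i+1
  let box := box.map (fun row =>
    PySem.List.slice row none (some
      (((PySem.List.enumerate row 1).filterMap (fun iv => if iv.2 ≠ "" then some iv.1 else none)).foldl max (0 : Int))))
  sb ++ box.map (fun row => PySem.Str.join "," row)

def line_format (layer_name : String) (diff : List (Int × (Int × Int) × Int)) : List String :=
  ("@" ++ layer_name ++ ":L") :: diff.map (fun p =>
    PySem.Int.toStr p.2.1.1 ++ "," ++ PySem.Int.toStr p.2.1.2 ++ ":" ++ PySem.Int.toStr p.2.2)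

def format_diff (layer_name : String) (diff : List (Int × (Int × Int) × Int)) : List String :=
  let coordinate_list := diff.map (fun p => (p.2.1.1, p.2.1.2))
  let r := compute_bounding_box coordinate_list
  let x1 := r.1; let y1 := r.2.1; let w := r.2.2.1; let h := r.2.2.2
  let size_box_format := (w - 1) * h
  let size_line_format := (coordinate_list.length : Int) * 8
  if size_box_format < size_line_format then
    box_format x1 y1 w h layer_name diff
  else
    line_format layer_name diff

-- ===== PORT B =====
def format_diff_alt (layer_name : String) (diff : List (Int × (Int × Int) × Int)) : List String :=
  match diff with
  | [] => []  -- Source B raises IndexError on diff[0] here; diff = [] is excluded by Pre_format_diff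
  | e :: _ =>
    let x0 := e.2.1.1
    let y0 := e.2.1.2
    let b := diff.foldl (fun (b : Int × Int × Int × Int) p =>
      let x := p.2.1.1
      let y := p.2.1.2
      (if x < b.1 then x else b.1,
       if b.2.1 < x then x else b.2.1,
       if y < b.2.2.1 then y else b.2.2.1,
       if b.2.2.2 < y then y else b.2.2.2)) (x0, x0, y0, y0)
    let x1 := b.1
    let x2 := b.2.1
    let y1 := b.2.2.1
    let y2 := b.2.2.2
    let w := x2 - x1 + 1
    let h := y2 - y1 + 1
    if (w - 1) * h < (diff.length : Int) * 8 then
      let rows : PySem.Dict Int (PySem.Dict Int String) :=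
        diff.foldl (fun rows p =>
          let cells := rows.getD (p.2.1.2 - y1) PySem.Dict.empty
          rows.insert (p.2.1.2 - y1) (cells.insert (p.2.1.1 - x1) (PySem.Int.toStr p.2.2)))
          PySem.Dict.empty
      ("@" ++ layer_name ++ ":B(" ++ PySem.Int.toStr x1 ++ "," ++ PySem.Int.toStr y1 ++ ")") ::
        (PySem.List.pyRange 0 h).map (fun r =>
          let cells := rows.getD r PySem.Dict.empty
          if cells.keys.isEmpty then ""
          else
            let m := (PySem.List.max? cells.keys id).getD 0
            PySem.Str.join "," ((PySem.List.pyRange 0 (m + 1)).map (fun c => cells.getD c "")))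
    else
      ("@" ++ layer_name ++ ":L") :: diff.map (fun p =>
        PySem.Int.toStr p.2.1.1 ++ "," ++ PySem.Int.toStr p.2.1.2 ++ ":" ++ PySem.Int.toStr p.2.2)

-- ===== PRECONDITION & SPEC =====
-- Pre_ excludes only the empty diff, on which Python A raises ValueError (min() of an empty sequence).
def Pre_format_diff (_layer_name : String) (diff : List (Int × (Int × Int) × Int)) : Prop := diff ≠ []
instance (layer_name : String) (diff : List (Int × (Int × Int) × Int)) : Decidable (Pre_format_diff layer_name diff) := by unfold Pre_format_diff; infer_instance
def pvWitness_format_diff : String × (List (Int × (Int × Int) × Int)) := ("tiles", [(0, (3, 4), 7), (1, (4, 4), 9)])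
def Spec_format_diff (layer_name : String) (diff : List (Int × (Int × Int) × Int)) (out : List String) : Prop := out = format_diff_alt layer_name diff
instance (layer_name : String) (diff : List (Int × (Int × Int) × Int)) (out : List String) : Decidable (Spec_format_diff layer_name diff out) := by unfold Spec_format_diff; infer_instance

-- ===== CLAIM (what is proved, stated in full; the proofs are below) =====
def Claim_equal_format_diff : Prop := ∀ (layer_name : String) (diff : List (Int × (Int × Int) × Int)), Dom_format_diff layer_name diff → Pre_format_diff layer_name diff → Spec_format_diff layer_name diff (format_diff layer_name diff)

-- ===== LEMMAS AND PROOFS =====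

-- str(n) is never the empty string
lemma pv_toStr_ne_empty (n : Int) : PySem.Int.toStr n ≠ "" := by
  intro h
  have h' : (PySem.Int.toStr n).toList = [] := by rw [h]; rfl
  rw [PySem.Int.toList_toStr] at h'
  unfold PySem.Int.toChars at h'
  split at h'
  · simp at h'
  · have := Nat.length_toDigits_pos (b := 10) (n := n.toNat)
    rw [h'] at this
    simp at this

lemma pv_min?_cons (x : Int) (l : List Int) :
    PySem.List.min? (x :: l) id = some (l.foldl (fun m v => if v < m then v else m) x) := by
  induction l generalizing x with
  | nil => rfl
  | cons y l ih =>
    have h : PySem.List.min? (x :: y :: l) id = PySem.List.min? ((if y < x then y else x) :: l) id := by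
      unfold PySem.List.min?
      simp only [List.foldl_cons]
      split
      · rename_i hlt
        rw [if_pos (by simpa using hlt)]
      · rename_i hlt
        rw [if_neg (by simpa using hlt)]
    rw [h, ih]
    simp only [List.foldl_cons]

lemma pv_max?_cons (x : Int) (l : List Int) :
    PySem.List.max? (x :: l) id = some (l.foldl (fun m v => if m < v then v else m) x) := by
  induction l generalizing x with
  | nil => rfl
  | cons y l ih =>
    have h : PySem.List.max? (x :: y :: l) id = PySem.List.max? ((if x < y then y else x) :: l) id := by
      unfold PySem.List.max?
      simp only [List.foldl_cons]
      split
      · rename_i hlt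
        rw [if_pos (by simpa using hlt)]
      · rename_i hlt
        rw [if_neg (by simpa using hlt)]
    rw [h, ih]
    simp only [List.foldl_cons]

lemma pv_fold4 (l : List (Int × (Int × Int) × Int)) (b : Int × Int × Int × Int) :
    l.foldl (fun (b : Int × Int × Int × Int) p =>
      let x := p.2.1.1
      let y := p.2.1.2
      (if x < b.1 then x else b.1,
       if b.2.1 < x then x else b.2.1,
       if y < b.2.2.1 then y else b.2.2.1,
       if b.2.2.2 < y then y else b.2.2.2)) b
    = ((l.map (fun p => p.2.1.1)).foldl (fun m v => if v < m then v else m) b.1,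
       (l.map (fun p => p.2.1.1)).foldl (fun m v => if m < v then v else m) b.2.1,
       (l.map (fun p => p.2.1.2)).foldl (fun m v => if v < m then v else m) b.2.2.1,
       (l.map (fun p => p.2.1.2)).foldl (fun m v => if m < v then v else m) b.2.2.2) := by
  induction l generalizing b with
  | nil => rfl
  | cons p l ih => simp only [List.map_cons, List.foldl_cons]; exact ih _

lemma pv_foldl_min_le (l : List Int) (a : Int) :
    l.foldl (fun m v => if v < m then v else m) a ≤ a ∧
      ∀ x ∈ l, l.foldl (fun m v => if v < m then v else m) a ≤ x := by
  induction l generalizing a with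
  | nil => simp
  | cons x l ih =>
    simp only [List.foldl_cons, List.mem_cons]
    obtain ⟨h1, h2⟩ := ih (if x < a then x else a)
    refine ⟨le_trans h1 (by split <;> omega), ?_⟩
    rintro y (rfl | hy)
    · exact le_trans h1 (by split <;> omega)
    · exact h2 y hy

lemma pv_foldl_max_ge (l : List Int) (a : Int) :
    a ≤ l.foldl (fun m v => if m < v then v else m) a ∧
      ∀ x ∈ l, x ≤ l.foldl (fun m v => if m < v then v else m) a := by
  induction l generalizing a with
  | nil => simp
  | cons x l ih =>
    simp only [List.foldl_cons, List.mem_cons]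
    obtain ⟨h1, h2⟩ := ih (if a < x then x else a)
    refine ⟨le_trans (by split <;> omega) h1, ?_⟩
    rintro y (rfl | hy)
    · exact le_trans (by split <;> omega) h1
    · exact h2 y hy

lemma pv_foldl_max_le (t : List Int) (a b : Int) (ha : a ≤ b) (h : ∀ y ∈ t, y ≤ b) :
    t.foldl max a ≤ b := by
  induction t generalizing a with
  | nil => exact ha
  | cons x t ih =>
    simp only [List.foldl_cons]
    exact ih _ (max_le ha (h x (by simp))) (fun y hy => h y (by simp [hy]))

lemma pv_mem_keys_iff {v : Type} (d : PySem.Dict Int v) (k : Int) :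
    k ∈ d.keys ↔ d.get? k ≠ none := by
  simp [PySem.Dict.keys, PySem.Dict.get?, List.find?_eq_none, List.mem_map]

lemma pv_keys_isEmpty_iff {v : Type} (d : PySem.Dict Int v) :
    d.keys.isEmpty = true ↔ ∀ k, d.get? k = none := by
  rw [List.isEmpty_iff, List.eq_nil_iff_forall_not_mem]
  constructor
  · intro h k
    by_contra hk
    exact h k ((pv_mem_keys_iff d k).2 hk)
  · intro h k hk
    exact (pv_mem_keys_iff d k).1 hk (h k)

-- the loop invariant tying A's dense grid to B's row dict
def pvInv (w h : Int) (box : List (List String)) (rows : PySem.Dict Int (PySem.Dict Int String)) : Prop :=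
  box.length = h.toNat ∧
  (∀ rn : Nat, rn < h.toNat → (box.getD rn []).length = w.toNat) ∧
  (∀ rn : Nat, rn < h.toNat → ∀ cn : Nat, cn < w.toNat →
      (box.getD rn []).getD cn "" = (rows.getD (rn : Int) PySem.Dict.empty).getD (cn : Int) "") ∧
  (∀ r c : Int, ∀ v, (rows.getD r PySem.Dict.empty).get? c = some v → 0 ≤ c ∧ c < w ∧ v ≠ "")

lemma pvInv_init (w h : Int) :
    pvInv w h (List.replicate h.toNat (List.replicate w.toNat "")) PySem.Dict.empty := by
  refine ⟨by simp, ?_, ?_, ?_⟩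
  · intro rn hrn
    simp [List.getD_eq_getElem?_getD, hrn]
  · intro rn hrn cn hcn
    simp [List.getD_eq_getElem?_getD, hrn, hcn,
      PySem.Dict.getD, PySem.Dict.empty, PySem.Dict.get?]
  · intro r c v hv
    simp [PySem.Dict.getD, PySem.Dict.empty, PySem.Dict.get?] at hv

lemma pvInv_step (w h : Int) (box : List (List String)) (rows : PySem.Dict Int (PySem.Dict Int String))
    (r c : Int) (s : String) (hInv : pvInv w h box rows)
    (hr : 0 ≤ r) (_hr2 : r < h) (hc : 0 ≤ c) (hc2 : c < w) (hs : s ≠ "") :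
    pvInv w h (pySet2 box r c s) (rows.insert r ((rows.getD r PySem.Dict.empty).insert c s)) := by
  obtain ⟨h1, h2, h3, h4⟩ := hInv
  unfold pySet2
  rw [if_neg (by omega)]
  have hmod : ∀ rn : Nat, rn < h.toNat →
      (box.modify r.toNat (fun row => row.set (if c < 0 then c + row.length else c).toNat s)).getD rn []
        = if r.toNat = rn
          then (box.getD rn []).set (if c < 0 then c + ((box.getD rn []) : List String).length else c).toNat s
          else box.getD rn [] := by
    intro rn hrn
    have hlt : rn < box.length := by omega
    rw [List.getD_eq_getElem?_getD, List.getElem?_modify, List.getElem?_eq_getElem hlt]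
    by_cases he : r.toNat = rn <;> simp [he, List.getD_eq_getElem?_getD, List.getElem?_eq_getElem hlt]
  refine ⟨by simp [h1], ?_, ?_, ?_⟩
  · intro rn hrn
    rw [hmod rn hrn]
    have := h2 rn hrn
    simp only [List.getD_eq_getElem?_getD] at this
    by_cases he : r.toNat = rn <;> simp [he, this]
  · intro rn hrn cn hcn
    have hrow := h2 rn hrn
    have hold := h3 rn hrn cn hcn
    rw [hmod rn hrn, PySem.Dict.getD_insert]
    by_cases he : r.toNat = rn
    · rw [if_pos he, if_pos (by omega : ((rn : Nat) : Int) = r)]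
      rw [if_neg (by omega : ¬ c < 0)]
      rw [List.getD_eq_getElem?_getD, List.getElem?_set]
      by_cases hce : c.toNat = cn
      · rw [if_pos hce, if_pos (by omega), PySem.Dict.getD_insert, if_pos (by omega : ((cn : Nat) : Int) = c)]
        rfl
      · rw [if_neg hce, PySem.Dict.getD_insert, if_neg (by omega : ¬ ((cn : Nat) : Int) = c)]
        rw [← List.getD_eq_getElem?_getD]
        rw [show r = ((rn : Nat) : Int) from by omega]
        exact hold
    · rw [if_neg he, if_neg (by omega : ¬ ((rn : Nat) : Int) = r)]
      exact hold
  · intro r' c' v hv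
    rw [PySem.Dict.getD_insert] at hv
    by_cases he : r' = r
    · rw [if_pos he] at hv
      by_cases hce : c' = c
      · subst hce
        rw [PySem.Dict.get?_insert_self] at hv
        cases hv
        exact ⟨hc, hc2, hs⟩
      · rw [PySem.Dict.get?_insert_of_ne _ _ hce] at hv
        exact h4 r c' v hv
    · rw [if_neg he] at hv
      exact h4 r' c' v hv

lemma pvInv_fold (w h y1 x1 : Int) (l : List (Int × (Int × Int) × Int))
    (box : List (List String)) (rows : PySem.Dict Int (PySem.Dict Int String))
    (hInv : pvInv w h box rows)
    (hb : ∀ p ∈ l, 0 ≤ p.2.1.2 - y1 ∧ p.2.1.2 - y1 < h ∧ 0 ≤ p.2.1.1 - x1 ∧ p.2.1.1 - x1 < w) :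
    pvInv w h
      (l.foldl (fun box p => pySet2 box (p.2.1.2 - y1) (p.2.1.1 - x1) (PySem.Int.toStr p.2.2)) box)
      (l.foldl (fun rows p =>
          let cells := rows.getD (p.2.1.2 - y1) PySem.Dict.empty
          rows.insert (p.2.1.2 - y1) (cells.insert (p.2.1.1 - x1) (PySem.Int.toStr p.2.2))) rows) := by
  induction l generalizing box rows with
  | nil => exact hInv
  | cons p l ih =>
    simp only [List.foldl_cons]
    obtain ⟨h1, h2, h3, h4⟩ := hb p (by simp)
    exact ih _ _ (pvInv_step w h box rows _ _ _ hInv h1 h2 h3 h4 (pv_toStr_ne_empty _))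
      (fun q hq => hb q (by simp [hq]))

lemma pv_row_eq (w : Int) (row : List String) (cells : PySem.Dict Int String)
    (hlen : row.length = w.toNat)
    (hcorr : ∀ cn : Nat, cn < w.toNat → row.getD cn "" = cells.getD (cn : Int) "")
    (hrange : ∀ c v, cells.get? c = some v → 0 ≤ c ∧ c < w ∧ v ≠ "") :
    PySem.Str.join "," (PySem.List.slice row none (some
        (((PySem.List.enumerate row 1).filterMap (fun iv => if iv.2 ≠ "" then some iv.1 else none)).foldl max (0 : Int))))
      = if cells.keys.isEmpty then ""
        else PySem.Str.join ","
          ((PySem.List.pyRange 0 ((PySem.List.max? cells.keys id).getD 0 + 1)).map (fun c => cells.getD c "")) := by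
  set idxs := (PySem.List.enumerate row 1).filterMap (fun iv => if iv.2 ≠ "" then some iv.1 else none) with hidxs
  have hmem : ∀ i : Int, i ∈ idxs ↔ ∃ cn : Nat, cn < row.length ∧ i = 1 + (cn : Int) ∧ row.getD cn "" ≠ "" := by
    intro i
    simp only [hidxs, List.mem_filterMap, PySem.List.mem_enumerate_iff]
    constructor
    · rintro ⟨a, ⟨k, hk, rfl⟩, hfa⟩
      split at hfa
      · cases hfa
        exact ⟨k, hk, rfl, by rwa [List.getD_eq_getElem _ _ hk]⟩
      · cases hfa
    · rintro ⟨cn, hcn, rfl, hne⟩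
      refine ⟨(1 + (cn : Int), row[cn]), ⟨cn, hcn, rfl⟩, ?_⟩
      rw [List.getD_eq_getElem _ _ hcn] at hne
      simp [hne]
  by_cases hemp : cells.keys.isEmpty
  · have hall : ∀ k, cells.get? k = none := (pv_keys_isEmpty_iff cells).1 hemp
    have hnil : idxs = [] := by
      rw [List.eq_nil_iff_forall_not_mem]
      intro i hi
      obtain ⟨cn, hcn, _, hne⟩ := (hmem i).1 hi
      apply hne
      rw [hcorr cn (by omega)]
      simp [PySem.Dict.getD, hall]
    rw [hnil]
    simp only [List.foldl_nil]
    rw [PySem.List.slice_to row (le_refl 0)]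
    rw [if_pos hemp]
    rfl
  · obtain ⟨k0, ks, hk⟩ : ∃ k0 ks, cells.keys = k0 :: ks := by
      cases hck : cells.keys with
      | nil => rw [hck] at hemp; simp at hemp
      | cons a l => exact ⟨a, l, rfl⟩
    have hm : PySem.List.max? cells.keys id = some ((PySem.List.max? cells.keys id).getD 0) := by
      rw [hk, pv_max?_cons]
      rfl
    set m := (PySem.List.max? cells.keys id).getD 0 with hmdef
    have hmmem : m ∈ cells.keys := PySem.List.max?_mem hm
    have hmax : ∀ y ∈ cells.keys, y ≤ m := fun y hy => PySem.List.max?_isMax hm y hy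
    obtain ⟨v, hv⟩ : ∃ v, cells.get? m = some v := by
      have := (pv_mem_keys_iff cells m).1 hmmem
      cases hq : cells.get? m with
      | none => exact absurd hq this
      | some v => exact ⟨v, rfl⟩
    obtain ⟨hm0, hmw, hvne⟩ := hrange m v hv
    have hgetne : ∀ cn : Nat, cn < w.toNat → row.getD cn "" ≠ "" → ((cn : Int) ≤ m) := by
      intro cn hcn hne
      apply hmax
      rw [pv_mem_keys_iff]
      intro hnone
      apply hne
      rw [hcorr cn hcn]
      simp [PySem.Dict.getD, hnone]
    have hle : ∀ i ∈ idxs, i ≤ 1 + (m.toNat : Int) := by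
      intro i hi
      obtain ⟨cn, hcn, rfl, hne⟩ := (hmem i).1 hi
      have := hgetne cn (by omega) hne
      omega
    have hk_le : idxs.foldl max 0 ≤ 1 + (m.toNat : Int) := pv_foldl_max_le idxs 0 _ (by omega) hle
    have hmemi : (1 + (m.toNat : Int)) ∈ idxs := by
      apply (hmem _).2
      refine ⟨m.toNat, by omega, rfl, ?_⟩
      rw [hcorr m.toNat (by omega)]
      have : ((m.toNat : Nat) : Int) = m := by omega
      rw [this]
      simp [PySem.Dict.getD, hv, hvne]
    have hk_ge := (PySem.List.le_foldl_max idxs 0).2 _ hmemi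
    have hkval : idxs.foldl max 0 = 1 + (m.toNat : Int) := le_antisymm hk_le hk_ge
    rw [hkval, PySem.List.slice_to row (by omega)]
    rw [if_neg (by simp [hemp])]
    rw [show m + 1 = ((m.toNat + 1 : Nat) : Int) from by omega, PySem.List.pyRange_zero_natCast]
    rw [show (1 + (m.toNat : Int)).toNat = m.toNat + 1 from by omega]
    congr 1
    apply List.ext_getElem
    · simp only [List.length_take, List.length_map, List.length_range, hlen]
      omega
    · intro i h1 h2
      rw [List.getElem_take, List.getElem_map, List.getElem_map, List.getElem_range]
      have hi : i < w.toNat := by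
        simp only [List.length_take, hlen] at h1
        omega
      rw [← List.getD_eq_getElem _ _ (by omega), hcorr i hi]


lemma pv_tail_eq (w h : Int) (hh : 0 < h) (box : List (List String))
    (rows : PySem.Dict Int (PySem.Dict Int String)) (hInv : pvInv w h box rows) :
    (box.map (fun row =>
        PySem.List.slice row none (some
          (((PySem.List.enumerate row 1).filterMap (fun iv => if iv.2 ≠ "" then some iv.1 else none)).foldl max (0 : Int))))).map
        (fun row => PySem.Str.join "," row)
      = (PySem.List.pyRange 0 h).map (fun r =>
          let cells := rows.getD r PySem.Dict.empty
          if cells.keys.isEmpty then ""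
          else
            let m := (PySem.List.max? cells.keys id).getD 0
            PySem.Str.join "," ((PySem.List.pyRange 0 (m + 1)).map (fun c => cells.getD c ""))) := by
  obtain ⟨hI1, hI2, hI3, hI4⟩ := hInv
  rw [show h = ((h.toNat : Nat) : Int) from by omega, PySem.List.pyRange_zero_natCast,
    List.map_map, List.map_map]
  apply List.ext_getElem
  · simp [hI1]
  · intro i hi1 hi2
    simp only [List.getElem_map, List.getElem_range, Function.comp_apply]
    have hi : i < h.toNat := by simpa using hi2
    have hlt : i < box.length := by omega
    have hlen : box[i].length = w.toNat := by
      have := hI2 i hi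
      rwa [List.getD_eq_getElem _ _ hlt] at this
    have hcorr : ∀ cn : Nat, cn < w.toNat →
        (box[i]).getD cn "" = (rows.getD ((i : Nat) : Int) PySem.Dict.empty).getD ((cn : Nat) : Int) "" := by
      intro cn hcn
      have := hI3 i hi cn hcn
      rwa [List.getD_eq_getElem _ _ hlt] at this
    exact pv_row_eq w (box[i]) (rows.getD ((i : Nat) : Int) PySem.Dict.empty) hlen hcorr
      (fun c v hv => hI4 (((i : Nat) : Int)) c v hv)

theorem format_diff_spec : Claim_equal_format_diff := by
  intro layer_name diff _hdom hpre
  unfold Spec_format_diff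
  cases diff with
  | nil => exact absurd rfl hpre
  | cons e t =>
    unfold format_diff compute_bounding_box format_diff_alt line_format
    simp only [List.map_map, Function.comp_def, List.map_cons, List.length_cons, List.length_map]
    rw [pv_min?_cons, pv_min?_cons, pv_max?_cons, pv_max?_cons, pv_fold4]
    simp only [List.map_cons, List.foldl_cons, ite_self, Option.getD_some]
    set mx := List.foldl (fun m v => if v < m then v else m) e.2.1.1 (t.map fun p => p.2.1.1) with hmx
    set Mx := List.foldl (fun m v => if m < v then v else m) e.2.1.1 (t.map fun p => p.2.1.1) with hMx
    set my := List.foldl (fun m v => if v < m then v else m) e.2.1.2 (t.map fun p => p.2.1.2) with hmy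
    set My := List.foldl (fun m v => if m < v then v else m) e.2.1.2 (t.map fun p => p.2.1.2) with hMy
    have hbx : ∀ p ∈ e :: t, mx ≤ p.2.1.1 ∧ p.2.1.1 ≤ Mx ∧ my ≤ p.2.1.2 ∧ p.2.1.2 ≤ My := by
      intro p hp
      rcases List.mem_cons.1 hp with rfl | hp
      · exact ⟨(pv_foldl_min_le _ _).1, (pv_foldl_max_ge _ _).1,
          (pv_foldl_min_le _ _).1, (pv_foldl_max_ge _ _).1⟩
      · exact ⟨(pv_foldl_min_le _ _).2 _ (List.mem_map_of_mem hp),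
          (pv_foldl_max_ge _ _).2 _ (List.mem_map_of_mem hp),
          (pv_foldl_min_le _ _).2 _ (List.mem_map_of_mem hp),
          (pv_foldl_max_ge _ _).2 _ (List.mem_map_of_mem hp)⟩
    obtain ⟨he1, he2, he3, he4⟩ := hbx e (by simp)
    rw [show Mx + 1 - mx = Mx - mx + 1 from by ring, show My + 1 - my = My - my + 1 from by ring]
    split_ifs with hcond
    · -- box branch
      have hInv := pvInv_fold (Mx - mx + 1) (My - my + 1) my mx (e :: t)
        (List.replicate (My - my + 1).toNat (List.replicate (Mx - mx + 1).toNat ""))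
        PySem.Dict.empty (pvInv_init _ _)
        (fun p hp => by
          obtain ⟨a, b, c, d⟩ := hbx p hp
          exact ⟨by omega, by omega, by omega, by omega⟩)
      simp only [box_format, List.singleton_append]
      congr 1
      exact pv_tail_eq (Mx - mx + 1) (My - my + 1) (by omega) _ _ hInv
    · rfl
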